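-- pv_equiv track=rewrite | github.com/drovi-co/drovi | drovi-intelligence/src/ops/world_brain_autoscaler.py | aggregate_pool_queue_depths
-- ===== SOURCE A (Python) =====
-- POOL_JOB_TYPES: dict[str, tuple[str, ...]] = {
--     "normalize": ("connector.sync",),
--     "graph": ("impact.compute", "normative.sentinel", "world_twin.stream_update"),
--     "ml": (
--         "learning.feedback.ingest",
--         "learning.recalibrate",
--         "mlops.shadow.evaluate",
--         "mlops.canary.evaluate",
--         "hypothesis.generate",
--         "hypothesis.rescore",
--     ),
--     "simulation": ("simulation.run", "intervention.propose", "intervention.outcome.capture"),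
--     "critical": (
--         "connector.sync",
--         "connectors.health_monitor",
--         "impact.compute",
--         "normative.sentinel",
--         "world_twin.snapshot",
--         "world_twin.stream_update",
--         "world_twin.prematerialize",
--         "lakehouse.lifecycle",
--         "source.reliability.calibrate",
--     ),
-- }
--
-- def aggregate_pool_queue_depths(job_counts: dict[str, int]) -> dict[str, int]:
--     normalized_counts = {
--         str(job_type): max(0, int(count))
--         for job_type, count in (job_counts or {}).items()
--     }
--     out: dict[str, int] = {}
--     for pool, job_types in POOL_JOB_TYPES.items():
--         out[pool] = int(sum(normalized_counts.get(job_type, 0) for job_type in job_types))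
--     return out
-- ===== SOURCE B (Python) =====
-- POOL_JOB_TYPES: dict[str, tuple[str, ...]] = {
--     "normalize": ("connector.sync",),
--     "graph": ("impact.compute", "normative.sentinel", "world_twin.stream_update"),
--     "ml": (
--         "learning.feedback.ingest",
--         "learning.recalibrate",
--         "mlops.shadow.evaluate",
--         "mlops.canary.evaluate",
--         "hypothesis.generate",
--         "hypothesis.rescore",
--     ),
--     "simulation": ("simulation.run", "intervention.propose", "intervention.outcome.capture"),
--     "critical": (
--         "connector.sync",
--         "connectors.health_monitor",
--         "impact.compute",
--         "normative.sentinel",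
--         "world_twin.snapshot",
--         "world_twin.stream_update",
--         "world_twin.prematerialize",
--         "lakehouse.lifecycle",
--         "source.reliability.calibrate",
--     ),
-- }
--
-- # Frozen membership sets, one per pool (derived once from POOL_JOB_TYPES).
-- _NORMALIZE = frozenset(POOL_JOB_TYPES["normalize"])
-- _GRAPH = frozenset(POOL_JOB_TYPES["graph"])
-- _ML = frozenset(POOL_JOB_TYPES["ml"])
-- _SIMULATION = frozenset(POOL_JOB_TYPES["simulation"])
-- _CRITICAL = frozenset(POOL_JOB_TYPES["critical"])
--
--
-- def aggregate_pool_queue_depths(job_counts: dict[str, int]) -> dict[str, int]: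
--     # One pass over the input with five scalar accumulators; no intermediate dicts.
--     normalize = graph = ml = simulation = critical = 0
--     for job_type, count in (job_counts or {}).items():
--         jt = str(job_type)
--         c = max(0, int(count))
--         if jt in _NORMALIZE:
--             normalize += c
--         if jt in _GRAPH:
--             graph += c
--         if jt in _ML:
--             ml += c
--         if jt in _SIMULATION:
--             simulation += c
--         if jt in _CRITICAL:
--             critical += c
--     return {
--         "normalize": normalize,
--         "graph": graph,
--         "ml": ml,
--         "simulation": simulation,
--         "critical": critical,
--     }
-- ===== Notes on version B (the rewrite author's own statement) =====
-- stated objective: alternative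
-- what changed: B drops A's intermediate normalized dict and per-pool inner sums entirely: it keeps five scalar accumulators (one per pool) and, in a single pass over the input, adds each normalized count to the accumulators of the pools whose precomputed membership set contains the job type, then builds the output dict directly.
import Mathlib
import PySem

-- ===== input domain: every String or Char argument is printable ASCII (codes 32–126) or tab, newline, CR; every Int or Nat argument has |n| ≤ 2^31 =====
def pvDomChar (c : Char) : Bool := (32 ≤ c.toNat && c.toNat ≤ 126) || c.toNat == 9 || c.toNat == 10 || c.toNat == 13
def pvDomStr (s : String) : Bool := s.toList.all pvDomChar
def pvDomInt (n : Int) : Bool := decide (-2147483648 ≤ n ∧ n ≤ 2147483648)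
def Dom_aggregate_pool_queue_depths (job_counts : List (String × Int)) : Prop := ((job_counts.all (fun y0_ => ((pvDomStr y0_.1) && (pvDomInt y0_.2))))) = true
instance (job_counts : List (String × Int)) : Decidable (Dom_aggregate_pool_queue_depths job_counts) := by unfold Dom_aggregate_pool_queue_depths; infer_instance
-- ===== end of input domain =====

-- B replaces A's normalized dict + per-pool inner sums by one pass with five scalar
-- accumulators and per-pool membership sets; same result, similar cost (objective: alternative).
-- Pre_ excludes association lists with duplicate keys: they do not represent a Python dict
-- (A's input type), and A's last-wins overwrite there is an artefact of the representation.


-- ===== PORT A =====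
-- POOL_JOB_TYPES (module-level constant, insertion order)
def pvPoolJobTypes : List (String × List String) :=
  [ ("normalize", ["connector.sync"]),
    ("graph", ["impact.compute", "normative.sentinel", "world_twin.stream_update"]),
    ("ml", ["learning.feedback.ingest", "learning.recalibrate", "mlops.shadow.evaluate",
            "mlops.canary.evaluate", "hypothesis.generate", "hypothesis.rescore"]),
    ("simulation", ["simulation.run", "intervention.propose", "intervention.outcome.capture"]),
    ("critical", ["connector.sync", "connectors.health_monitor", "impact.compute",
                  "normative.sentinel", "world_twin.snapshot", "world_twin.stream_update",
                  "world_twin.prematerialize", "lakehouse.lifecycle", "source.reliability.calibrate"]) ]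

def aggregate_pool_queue_depths (job_counts : List (String × Int)) : List (String × Int) :=
  -- `{str(jt): max(0, int(c)) for jt, c in (job_counts or {}).items()}` (str/int are
  -- identities on str/int values; `job_counts or {}` iterates the same pairs)
  let normalized_counts : PySem.Dict String Int :=
    job_counts.foldl (fun d p => d.insert p.1 (max 0 p.2)) PySem.Dict.empty
  let out : PySem.Dict String Int :=
    pvPoolJobTypes.foldl
      (fun out pj => out.insert pj.1 ((pj.2.map (fun jt => normalized_counts.getD jt 0)).sum))
      PySem.Dict.empty
  out.items

-- ===== PORT B =====
-- the module-level frozensets _NORMALIZE … _CRITICAL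
def pvSetNormalize : PySem.Set String := PySem.Set.ofList ["connector.sync"]
def pvSetGraph : PySem.Set String :=
  PySem.Set.ofList ["impact.compute", "normative.sentinel", "world_twin.stream_update"]
def pvSetMl : PySem.Set String :=
  PySem.Set.ofList ["learning.feedback.ingest", "learning.recalibrate", "mlops.shadow.evaluate",
                    "mlops.canary.evaluate", "hypothesis.generate", "hypothesis.rescore"]
def pvSetSimulation : PySem.Set String :=
  PySem.Set.ofList ["simulation.run", "intervention.propose", "intervention.outcome.capture"]
def pvSetCritical : PySem.Set String :=
  PySem.Set.ofList ["connector.sync", "connectors.health_monitor", "impact.compute",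
                    "normative.sentinel", "world_twin.snapshot", "world_twin.stream_update",
                    "world_twin.prematerialize", "lakehouse.lifecycle", "source.reliability.calibrate"]

def aggregate_pool_queue_depths_alt (job_counts : List (String × Int)) : List (String × Int) :=
  -- one pass, five scalar accumulators (normalize, graph, ml, simulation, critical)
  let acc : Int × Int × Int × Int × Int :=
    job_counts.foldl
      (fun a p =>
        let c := max 0 p.2
        (if PySem.Set.contains pvSetNormalize p.1 then a.1 + c else a.1,
         if PySem.Set.contains pvSetGraph p.1 then a.2.1 + c else a.2.1,
         if PySem.Set.contains pvSetMl p.1 then a.2.2.1 + c else a.2.2.1,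
         if PySem.Set.contains pvSetSimulation p.1 then a.2.2.2.1 + c else a.2.2.2.1,
         if PySem.Set.contains pvSetCritical p.1 then a.2.2.2.2 + c else a.2.2.2.2))
      (0, 0, 0, 0, 0)
  [("normalize", acc.1), ("graph", acc.2.1), ("ml", acc.2.2.1),
   ("simulation", acc.2.2.2.1), ("critical", acc.2.2.2.2)]

-- ===== PRECONDITION & SPEC =====
-- Pre_ excludes association lists with duplicate keys: the Python argument is a dict, whose
-- association-list representation always has distinct keys, so nothing A accepts is excluded.
def Pre_aggregate_pool_queue_depths (job_counts : List (String × Int)) : Prop :=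
  (job_counts.map (fun p => p.1)).Nodup
instance (job_counts : List (String × Int)) : Decidable (Pre_aggregate_pool_queue_depths job_counts) := by unfold Pre_aggregate_pool_queue_depths; infer_instance
def pvWitness_aggregate_pool_queue_depths : (List (String × Int)) :=
  [("connector.sync", 3), ("impact.compute", -2), ("simulation.run", 5)]

def Spec_aggregate_pool_queue_depths (job_counts : List (String × Int)) (out : List (String × Int)) : Prop := out = aggregate_pool_queue_depths_alt job_counts
instance (job_counts : List (String × Int)) (out : List (String × Int)) : Decidable (Spec_aggregate_pool_queue_depths job_counts out) := by unfold Spec_aggregate_pool_queue_depths; infer_instance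

-- ===== CLAIM (what is proved, stated in full; the proofs are below) =====
def Claim_equal_aggregate_pool_queue_depths : Prop := ∀ (job_counts : List (String × Int)), Dom_aggregate_pool_queue_depths job_counts → Pre_aggregate_pool_queue_depths job_counts → Spec_aggregate_pool_queue_depths job_counts (aggregate_pool_queue_depths job_counts)

-- ===== LEMMAS AND PROOFS =====

-- job-type list of the i-th pool
def pvT (i : Nat) : List String := (pvPoolJobTypes.getD i ("", [])).2

-- contribution of the whole input list to the i-th pool
def pvS (i : Nat) (l : List (String × Int)) : Int :=
  (l.map (fun p => if p.1 ∈ pvT i then max 0 p.2 else 0)).sum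

-- one accumulator update of B = add the (normalized) contribution
theorem pvStep (s : PySem.Set String) (ts : List String)
    (h : ∀ x, PySem.Set.contains s x = true ↔ x ∈ ts) (a c : Int) (k : String) :
    (if PySem.Set.contains s k then a + c else a) = a + (if k ∈ ts then c else 0) := by
  by_cases hk : k ∈ ts
  · rw [if_pos ((h k).mpr hk), if_pos hk]
  · rw [if_neg (fun hc => hk ((h k).mp hc)), if_neg hk, add_zero]

theorem pvMemNormalize (x : String) : PySem.Set.contains pvSetNormalize x = true ↔ x ∈ pvT 0 := by
  simp [pvSetNormalize, PySem.Set.mem_ofList, pvT, pvPoolJobTypes]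
theorem pvMemGraph (x : String) : PySem.Set.contains pvSetGraph x = true ↔ x ∈ pvT 1 := by
  simp [pvSetGraph, PySem.Set.mem_ofList, pvT, pvPoolJobTypes]
theorem pvMemMl (x : String) : PySem.Set.contains pvSetMl x = true ↔ x ∈ pvT 2 := by
  simp [pvSetMl, PySem.Set.mem_ofList, pvT, pvPoolJobTypes]
theorem pvMemSimulation (x : String) : PySem.Set.contains pvSetSimulation x = true ↔ x ∈ pvT 3 := by
  simp [pvSetSimulation, PySem.Set.mem_ofList, pvT, pvPoolJobTypes]
theorem pvMemCritical (x : String) : PySem.Set.contains pvSetCritical x = true ↔ x ∈ pvT 4 := by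
  simp [pvSetCritical, PySem.Set.mem_ofList, pvT, pvPoolJobTypes]

-- B's fold computes the five pool sums
theorem pvFoldB (l : List (String × Int)) : ∀ a1 a2 a3 a4 a5 : Int,
    l.foldl
      (fun a p =>
        let c := max 0 p.2
        (if PySem.Set.contains pvSetNormalize p.1 then a.1 + c else a.1,
         if PySem.Set.contains pvSetGraph p.1 then a.2.1 + c else a.2.1,
         if PySem.Set.contains pvSetMl p.1 then a.2.2.1 + c else a.2.2.1,
         if PySem.Set.contains pvSetSimulation p.1 then a.2.2.2.1 + c else a.2.2.2.1,
         if PySem.Set.contains pvSetCritical p.1 then a.2.2.2.2 + c else a.2.2.2.2))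
      (a1, a2, a3, a4, a5)
    = (a1 + pvS 0 l, a2 + pvS 1 l, a3 + pvS 2 l, a4 + pvS 3 l, a5 + pvS 4 l) := by
  induction l with
  | nil => intro a1 a2 a3 a4 a5; simp [pvS]
  | cons p l ih =>
    intro a1 a2 a3 a4 a5
    simp only [List.foldl_cons]
    rw [pvStep _ _ pvMemNormalize, pvStep _ _ pvMemGraph, pvStep _ _ pvMemMl,
        pvStep _ _ pvMemSimulation, pvStep _ _ pvMemCritical, ih]
    simp [pvS, add_assoc]

-- sum of the values at key t over an association list with distinct keys = dict lookup
theorem pvSumAtKey (t : String) (l : List (String × Int)) (h : (l.map (fun p => p.1)).Nodup) :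
    (l.map (fun p => if p.1 = t then p.2 else 0)).sum = (PySem.Dict.mk l).getD t 0 := by
  induction l with
  | nil => rfl
  | cons p l ih =>
    obtain ⟨k, w⟩ := p
    simp only [List.map_cons, List.nodup_cons] at h
    simp only [List.map_cons, List.sum_cons, PySem.Dict.getD_eq_get?_getD,
      PySem.Dict.get?_mk_cons, beq_iff_eq]
    by_cases ht : k = t
    · subst ht
      have hnc : (PySem.Dict.mk l).get? k = none := by
        rw [PySem.Dict.get?_eq_none_iff_not_mem_keys]
        simpa [PySem.Dict.keys] using h.1
      have h0 : (PySem.Dict.mk l).getD k 0 = 0 := by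
        simp [PySem.Dict.getD_eq_get?_getD, hnc]
      rw [if_pos rfl, if_pos rfl, ih h.2, h0]
      simp
    · rw [if_neg ht, if_neg ht, ih h.2, PySem.Dict.getD_eq_get?_getD]
      simp

-- the per-pool inner sum of A = a single sum over the association list
theorem pvSumPool (ts : List String) (hts : ts.Nodup) (l : List (String × Int))
    (h : (l.map (fun p => p.1)).Nodup) :
    (ts.map (fun jt => (PySem.Dict.mk l).getD jt 0)).sum
      = (l.map (fun p => if p.1 ∈ ts then p.2 else 0)).sum := by
  induction ts with
  | nil => simp
  | cons t ts ih =>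
    simp only [List.nodup_cons] at hts
    simp only [List.map_cons, List.sum_cons]
    rw [ih hts.2, ← pvSumAtKey t l h, ← List.sum_map_add]
    congr 1
    apply List.map_congr_left
    intro p _
    by_cases hp : p.1 = t
    · subst hp
      simp [hts.1]
    · simp [hp]

-- ===== VERDICT (by name: the statement is the Claim_ definition above) =====
theorem aggregate_pool_queue_depths_spec : Claim_equal_aggregate_pool_queue_depths := by
  intro jc _ hpre
  unfold Spec_aggregate_pool_queue_depths aggregate_pool_queue_depths aggregate_pool_queue_depths_alt
  set N : PySem.Dict String Int :=
    jc.foldl (fun d p => d.insert p.1 (max 0 p.2)) PySem.Dict.empty with hNdef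
  -- A: with distinct keys, the normalizing fold just maps the list
  have hitems : N.items = jc.map (fun p => (p.1, max 0 p.2)) := by
    rw [hNdef]
    have := PySem.Dict.items_foldl_insert_fresh (l := jc) (k := fun p => p.1)
      (v := fun p => max 0 p.2) (d := PySem.Dict.empty)
      (by intro a _; simp) hpre
    simpa using this
  have hN : N = PySem.Dict.mk (jc.map (fun p => (p.1, max 0 p.2))) :=
    PySem.Dict.ext (by rw [hitems])
  have hkeys : ((jc.map (fun p => (p.1, max 0 p.2))).map (fun p => p.1)).Nodup := by
    simpa [List.map_map, Function.comp] using hpre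
  have hA : (pvPoolJobTypes.foldl
      (fun out pj => out.insert pj.1 ((pj.2.map (fun jt => N.getD jt 0)).sum))
      PySem.Dict.empty).items
      = [("normalize", ((pvT 0).map (fun jt => N.getD jt 0)).sum),
         ("graph", ((pvT 1).map (fun jt => N.getD jt 0)).sum),
         ("ml", ((pvT 2).map (fun jt => N.getD jt 0)).sum),
         ("simulation", ((pvT 3).map (fun jt => N.getD jt 0)).sum),
         ("critical", ((pvT 4).map (fun jt => N.getD jt 0)).sum)] := by rfl
  have hpool : ∀ i : Nat, i < 5 → ((pvT i).map (fun jt => N.getD jt 0)).sum = pvS i jc := by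
    intro i hi
    have hts : (pvT i).Nodup := by interval_cases i <;> decide
    rw [hN, pvSumPool (pvT i) hts _ hkeys, pvS]
    simp only [List.map_map]
    rfl
  simp only [hA, pvFoldB]
  simp only [hpool 0 (by omega), hpool 1 (by omega), hpool 2 (by omega),
    hpool 3 (by omega), hpool 4 (by omega), zero_add]
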